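-- pv_equiv track=rewrite | github.com/paprik05/Praca-Licencjacka | problems/prob22.py | prob22
-- ===== SOURCE A (Python) =====
-- def prob22(r):
--     if r <= 0:
--         return {"error": "r must be a positive integer"}
--
--     results = []
--     for n in range(1, r + 1):
--         if (n*2**n+1) % 3 == 0:
--             results.append(f"{n}: 3|n*2**n+1 = 3|{n*2**n+1}")
--
--     return {"result": results}
-- ===== SOURCE B (Python) =====
-- def prob22(r):
--     if r <= 0:
--         return {"error": "r must be a positive integer"}
--
--     # (n*2**n+1) % 3 == 0 holds exactly when n % 6 is 1 or 2 (2**n mod 3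
--     # alternates 2,1), so emit those n directly, block by block, no test.
--     results = []
--     n = 1
--     while n <= r:
--         results.append(f"{n}: 3|n*2**n+1 = 3|{n*2**n+1}")
--         if n + 1 <= r:
--             m = n + 1
--             results.append(f"{m}: 3|n*2**n+1 = 3|{m*2**m+1}")
--         n += 6
--     return {"result": results}
-- ===== Notes on version B (the rewrite author's own statement) =====
-- stated objective: alternative
-- what changed: B replaces the scan of all n from one to r with the per-n divisibility test by a derived closed-form residue characterisation (n mod six is one or two) and emits exactly those n block by block, never testing divisibility.
import Mathlib
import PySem

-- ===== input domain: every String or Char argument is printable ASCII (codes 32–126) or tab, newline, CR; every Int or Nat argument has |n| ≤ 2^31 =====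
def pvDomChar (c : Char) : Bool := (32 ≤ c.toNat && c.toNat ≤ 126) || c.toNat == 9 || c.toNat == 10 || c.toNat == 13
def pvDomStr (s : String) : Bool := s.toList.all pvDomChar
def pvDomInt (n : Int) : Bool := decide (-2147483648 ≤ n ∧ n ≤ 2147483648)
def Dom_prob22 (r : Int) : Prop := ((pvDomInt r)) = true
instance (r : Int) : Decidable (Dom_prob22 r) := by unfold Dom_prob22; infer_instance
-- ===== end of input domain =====

-- B emits the qualifying n directly from the closed-form residue rule n % 6 ∈ {1,2}
-- instead of testing (n*2**n+1) % 3 for every n; same output, alternative algorithm.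
-- Python A/B return {"error": <string>} (a str value, not a list) for r <= 0; that
-- return is not a value of the declared type List (String × List String), so Pre_
-- excludes r <= 0 and the ports return [] there.


-- shared f-string "{n}: 3|n*2**n+1 = 3|{n*2**n+1}" (exact: only n ≥ 1 is ever formatted,
-- so 2^n.toNat = 2**n)
def pvFmt (n : Int) : String :=
  PySem.Int.toStr n ++ ": 3|n*2**n+1 = 3|" ++ PySem.Int.toStr (n * 2 ^ n.toNat + 1)

-- ===== PORT A =====
def prob22 (r : Int) : List (String × List String) :=
  if r ≤ 0 then []  -- Python returns {"error": <str>} here (not of the declared type); outside Pre_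
  else
    [("result",
      (PySem.List.pyRange 1 (r + 1) 1).foldl
        (fun acc n => if PySem.Int.mod (n * 2 ^ n.toNat + 1) 3 == 0 then acc ++ [pvFmt n] else acc)
        [])]

-- ===== PORT B =====
-- the while loop of Source B: emit n and (if it fits) n+1, advance by 6
def pvEmit (n r : Int) : List String :=
  if h : n ≤ r then
    pvFmt n :: ((if n + 1 ≤ r then [pvFmt (n + 1)] else []) ++ pvEmit (n + 6) r)
  else []
termination_by (r + 1 - n).toNat
decreasing_by omega

def prob22_alt (r : Int) : List (String × List String) :=
  if r ≤ 0 then []  -- Python returns {"error": <str>} here (not of the declared type); outside Pre_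
  else [("result", pvEmit 1 r)]

-- ===== PRECONDITION & SPEC =====
-- Pre_ excludes r ≤ 0, where both Pythons return {"error": <str>} — a str-valued dict
-- that is not a value of the declared return type List (String × List String).
def Pre_prob22 (r : Int) : Prop := 0 < r
instance (r : Int) : Decidable (Pre_prob22 r) := by unfold Pre_prob22; infer_instance
def pvWitness_prob22 : Int := 5
def Spec_prob22 (r : Int) (out : List (String × List String)) : Prop := out = prob22_alt r
instance (r : Int) (out : List (String × List String)) : Decidable (Spec_prob22 r out) := by unfold Spec_prob22; infer_instance

-- ===== CLAIM (what is proved, stated in full; the proofs are below) =====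
def Claim_equal_prob22 : Prop := ∀ (r : Int), Dom_prob22 r → Pre_prob22 r → Spec_prob22 r (prob22 r)

-- ===== LEMMAS AND PROOFS =====

def pvQ (m : Int) : Bool := m % 6 == 1 || m % 6 == 2

theorem pow2mod3 (k : ℕ) : (2 : ℤ) ^ k % 3 = if k % 2 = 0 then 1 else 2 := by
  induction k with
  | zero => norm_num
  | succ k ih =>
    rw [pow_succ, Int.mul_emod, ih]
    by_cases h : k % 2 = 0
    · have h1 : (k + 1) % 2 = 1 := by omega
      simp [h, h1]
    · have h1 : (k + 1) % 2 = 0 := by omega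
      simp [h, h1]

theorem predEquiv (n : Int) (h : 1 ≤ n) :
    (PySem.Int.mod (n * 2 ^ n.toNat + 1) 3 == 0) = pvQ n := by
  have hp := pow2mod3 n.toNat
  rw [PySem.Int.mod_eq_emod_of_pos (by norm_num), Int.add_emod, Int.mul_emod]
  unfold pvQ
  by_cases he : n % 2 = 0
  · have h2 : n.toNat % 2 = 0 := by omega
    rw [if_pos h2] at hp
    rw [hp, Bool.eq_iff_iff]
    simp only [beq_iff_eq, Bool.or_eq_true, mul_one]
    omega
  · have h2 : ¬ (n.toNat % 2 = 0) := by omega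
    rw [if_neg h2] at hp
    rw [hp, Bool.eq_iff_iff]
    simp only [beq_iff_eq, Bool.or_eq_true]
    omega

-- what B's loop produces: exactly the residues {1,2} mod 6 from the range, formatted
theorem pvEmit_char : ∀ (k : ℕ) (n r : Int), (r + 1 - n).toNat ≤ k → n % 6 = 1 →
    pvEmit n r = ((PySem.List.pyRange n (r + 1) 1).filter pvQ).map pvFmt := by
  intro k
  induction k with
  | zero =>
    intro n r hk hn
    rw [pvEmit, dif_neg (by omega), PySem.List.pyRange_one_eq_nil (by omega)]
    simp
  | succ k ih =>
    intro n r hk hn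
    by_cases hle : n ≤ r
    · have q0 : pvQ n = true := by simp [pvQ]; omega
      have q1 : pvQ (n + 1) = true := by simp [pvQ]; omega
      have q2 : pvQ (n + 1 + 1) = false := by simp [pvQ]; omega
      have q3 : pvQ (n + 1 + 1 + 1) = false := by simp [pvQ]; omega
      have q4 : pvQ (n + 1 + 1 + 1 + 1) = false := by simp [pvQ]; omega
      have q5 : pvQ (n + 1 + 1 + 1 + 1 + 1) = false := by simp [pvQ]; omega
      by_cases h5 : n + 5 ≤ r
      · rw [pvEmit, dif_pos hle, if_pos (by omega),
            PySem.List.pyRange_one_append n (n + 6) (r + 1) (by omega) (by omega),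
            PySem.List.pyRange_one_cons (a := n) (by omega),
            PySem.List.pyRange_one_cons (a := n + 1) (by omega),
            PySem.List.pyRange_one_cons (a := n + 1 + 1) (by omega),
            PySem.List.pyRange_one_cons (a := n + 1 + 1 + 1) (by omega),
            PySem.List.pyRange_one_cons (a := n + 1 + 1 + 1 + 1) (by omega),
            PySem.List.pyRange_one_cons (a := n + 1 + 1 + 1 + 1 + 1) (by omega),
            PySem.List.pyRange_one_eq_nil (a := n + 1 + 1 + 1 + 1 + 1 + 1) (by omega),
            ih (n + 6) r (by omega) (by omega)]
        simp only [List.filter_append, List.filter_cons, List.filter_nil, q0, q1, q2, q3, q4, q5,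
          if_true, if_false, List.map_cons, List.map_append, List.nil_append,
          List.cons_append, List.singleton_append]
        simp
      · have htail : pvEmit (n + 6) r = [] := by rw [pvEmit, dif_neg (by omega)]
        have hcase : r = n ∨ r = n + 1 ∨ r = n + 2 ∨ r = n + 3 ∨ r = n + 4 := by omega
        rw [pvEmit, dif_pos hle, htail]
        rcases hcase with h | h | h | h | h <;> subst h
        · rw [if_neg (by omega), PySem.List.pyRange_one_cons (by omega),
              PySem.List.pyRange_one_eq_nil (by omega)]
          simp only [List.filter_cons, List.filter_nil, q0, if_true, List.map_cons, List.map_nil,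
            List.append_nil, List.nil_append]
        · rw [if_pos (by omega), PySem.List.pyRange_one_cons (a := n) (by omega),
              PySem.List.pyRange_one_cons (a := n + 1) (by omega),
              PySem.List.pyRange_one_eq_nil (by omega)]
          simp only [List.filter_cons, List.filter_nil, q0, q1, if_true, List.map_cons,
            List.map_nil, List.append_nil, List.cons_append, List.nil_append,
            List.singleton_append]
        · rw [if_pos (by omega), PySem.List.pyRange_one_cons (a := n) (by omega),
              PySem.List.pyRange_one_cons (a := n + 1) (by omega),
              PySem.List.pyRange_one_cons (a := n + 1 + 1) (by omega),
              PySem.List.pyRange_one_eq_nil (by omega)]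
          simp only [List.filter_cons, List.filter_nil, q0, q1, q2, if_true, if_false,
            List.map_cons, List.map_nil, List.append_nil, List.cons_append, List.nil_append,
            List.singleton_append]
          simp
        · rw [if_pos (by omega), PySem.List.pyRange_one_cons (a := n) (by omega),
              PySem.List.pyRange_one_cons (a := n + 1) (by omega),
              PySem.List.pyRange_one_cons (a := n + 1 + 1) (by omega),
              PySem.List.pyRange_one_cons (a := n + 1 + 1 + 1) (by omega),
              PySem.List.pyRange_one_eq_nil (by omega)]
          simp only [List.filter_cons, List.filter_nil, q0, q1, q2, q3, if_true, if_false,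
            List.map_cons, List.map_nil, List.append_nil, List.cons_append, List.nil_append,
            List.singleton_append]
          simp
        · rw [if_pos (by omega), PySem.List.pyRange_one_cons (a := n) (by omega),
              PySem.List.pyRange_one_cons (a := n + 1) (by omega),
              PySem.List.pyRange_one_cons (a := n + 1 + 1) (by omega),
              PySem.List.pyRange_one_cons (a := n + 1 + 1 + 1) (by omega),
              PySem.List.pyRange_one_cons (a := n + 1 + 1 + 1 + 1) (by omega),
              PySem.List.pyRange_one_eq_nil (by omega)]
          simp only [List.filter_cons, List.filter_nil, q0, q1, q2, q3, q4, if_true, if_false,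
            List.map_cons, List.map_nil, List.append_nil, List.cons_append, List.nil_append,
            List.singleton_append]
          simp
    · rw [pvEmit, dif_neg hle, PySem.List.pyRange_one_eq_nil (by omega)]
      simp

-- ===== VERDICT (by name: the statement is the Claim_ definition above) =====
theorem prob22_spec : Claim_equal_prob22 := by
  intro r _ hpre
  have hr : ¬ (r ≤ 0) := by unfold Pre_prob22 at hpre; omega
  show prob22 r = prob22_alt r
  unfold prob22 prob22_alt
  rw [if_neg hr, if_neg hr, PySem.List.foldl_append_if]
  have hfc : (PySem.List.pyRange 1 (r + 1) 1).filter
      (fun n => PySem.Int.mod (n * 2 ^ n.toNat + 1) 3 == 0) =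
      (PySem.List.pyRange 1 (r + 1) 1).filter pvQ := by
    apply List.filter_congr
    intro m hm
    exact predEquiv m (PySem.List.mem_pyRange_one.mp hm).1
  rw [hfc, ← pvEmit_char (r + 1 - 1).toNat 1 r (le_refl _) (by norm_num)]
  simp
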